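-- pv_equiv track=rewrite | github.com/heltonmaia/proj-question-generator | question_generator/questions/question_ch5_0063.py | analisar_numeros
-- ===== SOURCE A (Python) =====
-- def analisar_numeros(lista_de_inteiros: list[int]) -> tuple[int, int, int]:
--     """
--     Analisa uma lista de números inteiros, calculando a soma total,
--     a contagem de números pares e a contagem de números ímpares.
--
--     Args:
--         lista_de_inteiros (list[int]): Uma lista de números inteiros.
--
--     Returns:
--         tuple[int, int, int]: Uma tupla contendo:
--                               - A soma total dos números.
--                               - A contagem de números pares.
--                               - A contagem de números ímpares.
--     """
--     soma_total = 0
--     contagem_pares = 0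
--     contagem_impares = 0
--
--     for numero in lista_de_inteiros:
--         soma_total += numero
--         if numero % 2 == 0:
--             contagem_pares += 1
--         else:
--             contagem_impares += 1
--
--     return soma_total, contagem_pares, contagem_impares
-- ===== SOURCE B (Python) =====
-- def analisar_numeros(lista_de_inteiros: list[int]) -> tuple[int, int, int]:
--     soma_total = sum(lista_de_inteiros)
--     contagem_pares = sum(1 for n in lista_de_inteiros if n % 2 == 0)
--     contagem_impares = len(lista_de_inteiros) - contagem_pares
--     return soma_total, contagem_pares, contagem_impares
-- ===== Notes on version B (the rewrite author's own statement) =====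
-- stated objective: idiomatic
-- what changed: Replaces the single fused accumulator loop by separate built-in passes (sum and a filtered count) and derives the odd count algebraically as len - evens instead of incrementing it.
import Mathlib
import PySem

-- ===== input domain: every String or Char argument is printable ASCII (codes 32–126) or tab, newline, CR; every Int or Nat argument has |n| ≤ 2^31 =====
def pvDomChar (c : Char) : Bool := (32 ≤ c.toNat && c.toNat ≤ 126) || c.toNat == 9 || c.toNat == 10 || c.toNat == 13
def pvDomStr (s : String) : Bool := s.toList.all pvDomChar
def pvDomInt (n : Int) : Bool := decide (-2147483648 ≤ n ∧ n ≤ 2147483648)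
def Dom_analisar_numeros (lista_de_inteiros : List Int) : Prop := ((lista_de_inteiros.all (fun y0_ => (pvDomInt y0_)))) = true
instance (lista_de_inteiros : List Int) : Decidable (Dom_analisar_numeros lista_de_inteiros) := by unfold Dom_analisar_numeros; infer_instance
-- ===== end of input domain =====

-- B computes the same (sum, evens, odds) tuple via separate passes and odds = length - evens (idiomatic decomposition).


-- ===== PORT A =====
def analisar_numeros (lista_de_inteiros : List Int) : Int × Int × Int :=
  let st := lista_de_inteiros.foldl
    (fun (acc : Int × Int × Int) numero =>
      let soma := acc.1 + numero
      if PySem.Int.mod numero 2 = 0 then (soma, acc.2.1 + 1, acc.2.2)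
      else (soma, acc.2.1, acc.2.2 + 1))
    (0, 0, 0)
  st

-- ===== PORT B =====
-- B: sum built-in, count of evens by a filtered count, odds = length - evens
def analisar_numeros_alt (lista_de_inteiros : List Int) : Int × Int × Int :=
  let soma_total := lista_de_inteiros.sum
  let contagem_pares : Int := (lista_de_inteiros.countP (fun n => PySem.Int.mod n 2 = 0))
  (soma_total, contagem_pares, (lista_de_inteiros.length : Int) - contagem_pares)

-- ===== PRECONDITION & SPEC =====
def Spec_analisar_numeros (lista_de_inteiros : List Int) (out : Int × Int × Int) : Prop := out = analisar_numeros_alt lista_de_inteiros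
instance (lista_de_inteiros : List Int) (out : Int × Int × Int) : Decidable (Spec_analisar_numeros lista_de_inteiros out) := by unfold Spec_analisar_numeros; infer_instance

-- ===== CLAIM (what is proved, stated in full; the proofs are below) =====
def Claim_equal_analisar_numeros : Prop := ∀ (lista_de_inteiros : List Int), Dom_analisar_numeros lista_de_inteiros → Spec_analisar_numeros lista_de_inteiros (analisar_numeros lista_de_inteiros)

-- ===== LEMMAS AND PROOFS =====

-- ===== VERDICT (by name: the statement is the Claim_ definition above) =====
lemma fold_eq (l : List Int) (s p q : Int) :
    l.foldl
      (fun (acc : Int × Int × Int) numero =>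
        let soma := acc.1 + numero
        if PySem.Int.mod numero 2 = 0 then (soma, acc.2.1 + 1, acc.2.2)
        else (soma, acc.2.1, acc.2.2 + 1))
      (s, p, q)
    = (s + l.sum, p + (l.countP (fun n => PySem.Int.mod n 2 = 0)),
       q + ((l.length : Int) - (l.countP (fun n => PySem.Int.mod n 2 = 0)))) := by
  induction l generalizing s p q with
  | nil => simp
  | cons x xs ih =>
    simp only [List.foldl_cons, List.sum_cons, List.countP_cons, List.length_cons]
    by_cases h : PySem.Int.mod x 2 = 0
    · rw [if_pos h, ih]
      simp only [h, decide_true, if_true, Prod.mk.injEq]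
      refine ⟨by ring, by push_cast; ring, by push_cast; ring⟩
    · rw [if_neg h, ih]
      simp only [h, decide_false, if_false, Prod.mk.injEq]
      refine ⟨by ring, by push_cast; ring, by push_cast; ring⟩

theorem analisar_numeros_spec : Claim_equal_analisar_numeros := by
  intro l _
  unfold Spec_analisar_numeros analisar_numeros analisar_numeros_alt
  have h := fold_eq l 0 0 0
  simp only [zero_add] at h
  simp only [h]
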